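-- pv_equiv track=rewrite | github.com/AndyGiorgio/my_practice_repo | python/homework1.py/hw1.py | hascode
-- ===== SOURCE A (Python) =====
-- def hascode(string):
--     targ='code'
--     tot=0
--     for i in range(len(string)-3):
--         if string[i]=='c'and string[i+1]=='o' and string[i+3]=='e':
--             tot+=1
--     return tot
--
--     """
--     Return the number of times that the string "code" appears anywhere in the given string,
--     except we'll accept any letter for the 'd', so "cope" and "cooe" count.
--     """
-- ===== SOURCE B (Python) =====
-- def hascode(string):
--     # Greedy non-overlapping scan: jump past a whole match (4 chars) when found.
--     # Correct because two matches can never overlap (the fixed 'o' and 'e'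
--     # positions of one match rule out a 'c','o' start inside it).
--     tot = 0
--     i = 0
--     n = len(string)
--     while i <= n - 4:
--         if string[i] == 'c' and string[i + 1] == 'o' and string[i + 3] == 'e':
--             tot += 1
--             i += 4
--         else:
--             i += 1
--     return tot
-- ===== Notes on version B (the rewrite author's own statement) =====
-- stated objective: alternative
-- what changed: Replaces the count-every-window index for-loop with a greedy non-overlapping while-scan that jumps 4 positions past each match, relying on a proof that matches of the pattern c,o,_,e cannot overlap.
import Mathlib
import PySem

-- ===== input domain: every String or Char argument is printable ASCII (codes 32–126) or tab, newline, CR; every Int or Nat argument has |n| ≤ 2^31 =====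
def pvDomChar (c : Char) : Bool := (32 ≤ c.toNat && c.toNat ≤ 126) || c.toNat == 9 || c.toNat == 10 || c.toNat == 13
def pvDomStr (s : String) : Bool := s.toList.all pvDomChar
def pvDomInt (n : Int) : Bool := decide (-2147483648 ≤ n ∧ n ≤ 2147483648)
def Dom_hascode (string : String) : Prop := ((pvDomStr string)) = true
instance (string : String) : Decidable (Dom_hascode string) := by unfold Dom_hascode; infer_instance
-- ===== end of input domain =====

-- B replaces A's count-every-window index loop by a greedy non-overlapping scan
-- that jumps 4 positions past each match (matches of c,o,_,e cannot overlap).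

-- ===== PORT A =====
def hascode (string : String) : Int :=
  let cs := string.toList
  (PySem.List.pyRange 0 ((cs.length : Int) - 3) 1).foldl
    (fun tot i =>
      if PySem.List.pyGet? cs i = some 'c' ∧ PySem.List.pyGet? cs (i + 1) = some 'o' ∧
         PySem.List.pyGet? cs (i + 3) = some 'e'
      then tot + 1 else tot) 0

-- ===== PORT B =====
def hascodeAltGo (cs : List Char) (i : Int) (tot : Int) : Int :=
  if h : i ≤ (cs.length : Int) - 4 then
    if PySem.List.pyGet? cs i = some 'c' ∧ PySem.List.pyGet? cs (i + 1) = some 'o' ∧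
       PySem.List.pyGet? cs (i + 3) = some 'e'
    then hascodeAltGo cs (i + 4) (tot + 1)
    else hascodeAltGo cs (i + 1) tot
  else tot
termination_by ((cs.length : Int) - i).toNat
decreasing_by all_goals omega

def hascode_alt (string : String) : Int := hascodeAltGo string.toList 0 0

-- ===== PRECONDITION & SPEC =====
def Spec_hascode (string : String) (out : Int) : Prop := out = hascode_alt string
instance (string : String) (out : Int) : Decidable (Spec_hascode string out) := by unfold Spec_hascode; infer_instance

-- ===== CLAIM (what is proved, stated in full; the proofs are below) =====
def Claim_equal_hascode : Prop := ∀ (string : String), Dom_hascode string → Spec_hascode string (hascode string)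

-- ===== LEMMAS AND PROOFS =====

-- 1 iff the list starts with the window c, o, _, e
def indHead : List Char → Int
  | a :: b :: _ :: d :: _ => if a = 'c' ∧ b = 'o' ∧ d = 'e' then 1 else 0
  | _ => 0

-- total count of (possibly overlapping) window matches, one suffix at a time
def countAll : List Char → Int
  | [] => 0
  | a :: t => indHead (a :: t) + countAll t

theorem indHead_zero_head {x : Char} {r : List Char} (hx : x ≠ 'c') : indHead (x :: r) = 0 := by
  match r with
  | [] | [_] | [_, _] => rfl
  | _ :: _ :: _ :: _ => simp [indHead, hx]

theorem indHead_zero_snd {x y : Char} {r : List Char} (hy : y ≠ 'o') : indHead (x :: y :: r) = 0 := by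
  match r with
  | [] | [_] => rfl
  | _ :: _ :: _ => simp [indHead, hy]

theorem countAll_short {l : List Char} (h : l.length ≤ 3) : countAll l = 0 := by
  match l with
  | [] => rfl
  | [a] => simp [countAll, indHead]
  | [a, b] => simp [countAll, indHead]
  | [a, b, c] => simp [countAll, indHead]
  | _ :: _ :: _ :: _ :: _ => simp at h; omega

-- A's indicator at index k of l, written on getElem?
def indAt (l : List Char) (k : Nat) : Int :=
  if l[k]? = some 'c' ∧ l[k + 1]? = some 'o' ∧ l[k + 3]? = some 'e' then 1 else 0

theorem indAt_cons_succ (a : Char) (t : List Char) (k : Nat) :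
    indAt (a :: t) (k + 1) = indAt t k := by
  simp [indAt]

def sumInd (l : List Char) : Int :=
  ((List.range ((l.length : Int) - 3).toNat).map (fun k => indAt l k)).sum

theorem sumInd_cons (a : Char) (t : List Char) :
    sumInd (a :: t) = indHead (a :: t) + sumInd t := by
  by_cases h3 : 3 ≤ t.length
  · obtain ⟨b, c, d, r, rfl⟩ : ∃ b c d r, t = b :: c :: d :: r := by
      match t with
      | b :: c :: d :: r => exact ⟨b, c, d, r, rfl⟩
      | [] | [_] | [_, _] => simp at h3
    have hlen : (((a :: b :: c :: d :: r).length : Int) - 3).toNat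
        = (((b :: c :: d :: r).length : Int) - 3).toNat + 1 := by
      simp; omega
    rw [sumInd, hlen, List.range_succ_eq_map]
    simp only [List.map_cons, List.map_map, List.sum_cons]
    have hmap : (List.range (((b :: c :: d :: r).length : Int) - 3).toNat).map
          ((fun k => indAt (a :: b :: c :: d :: r) k) ∘ Nat.succ)
        = (List.range (((b :: c :: d :: r).length : Int) - 3).toNat).map
          (fun k => indAt (b :: c :: d :: r) k) := by
      refine List.map_congr_left (fun k _ => ?_)
      simpa using indAt_cons_succ a (b :: c :: d :: r) k
    rw [hmap]
    have h0 : indAt (a :: b :: c :: d :: r) 0 = indHead (a :: b :: c :: d :: r) := by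
      simp [indAt, indHead]
    rw [h0]; rfl
  · have h1 : (((a :: t).length : Int) - 3).toNat = 0 := by simp; omega
    have h2 : ((t.length : Int) - 3).toNat = 0 := by omega
    have hih : indHead (a :: t) = 0 := by
      match t with
      | [] | [_] | [_, _] => rfl
      | _ :: _ :: _ :: _ => simp at h3
    rw [sumInd, h1, sumInd, h2, hih]
    simp

theorem sumInd_eq_countAll (l : List Char) : sumInd l = countAll l := by
  induction l with
  | nil => rfl
  | cons a t ih => rw [sumInd_cons, countAll, ih]

theorem hascode_eq_countAll (string : String) : hascode string = countAll string.toList := by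
  rw [hascode]
  have hfold : ∀ (L : List Int) (init : Int),
      L.foldl (fun tot i =>
        if PySem.List.pyGet? string.toList i = some 'c' ∧
           PySem.List.pyGet? string.toList (i + 1) = some 'o' ∧
           PySem.List.pyGet? string.toList (i + 3) = some 'e'
        then tot + 1 else tot) init
      = init + (L.map (fun i =>
          if PySem.List.pyGet? string.toList i = some 'c' ∧
             PySem.List.pyGet? string.toList (i + 1) = some 'o' ∧
             PySem.List.pyGet? string.toList (i + 3) = some 'e'
          then (1 : Int) else 0)).sum := by
    intro L
    induction L with
    | nil => intro init; simp
    | cons x xs ih =>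
        intro init
        rw [List.foldl_cons, List.map_cons, List.sum_cons]
        by_cases hx : PySem.List.pyGet? string.toList x = some 'c' ∧
           PySem.List.pyGet? string.toList (x + 1) = some 'o' ∧
           PySem.List.pyGet? string.toList (x + 3) = some 'e'
        · rw [if_pos hx, if_pos hx, ih]; ring
        · rw [if_neg hx, if_neg hx, ih]; ring
  rw [hfold, PySem.List.pyRange_one, List.map_map]
  rw [← sumInd_eq_countAll, sumInd]
  have : ∀ k ∈ List.range ((string.toList.length : Int) - 3 - 0).toNat,
      ((fun i =>
          if PySem.List.pyGet? string.toList i = some 'c' ∧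
             PySem.List.pyGet? string.toList (i + 1) = some 'o' ∧
             PySem.List.pyGet? string.toList (i + 3) = some 'e'
          then (1 : Int) else 0) ∘ fun k : Nat => (0 : Int) + k) k = indAt string.toList k := by
    intro k _
    have e1 : ((k : Int) + 1) = ((k + 1 : Nat) : Int) := by push_cast; ring
    have e3 : ((k : Int) + 3) = ((k + 3 : Nat) : Int) := by push_cast; ring
    simp only [Function.comp_apply, zero_add, e1, e3, PySem.List.pyGet?_natCast, indAt]
  rw [List.map_congr_left this]
  simp

theorem countAll_four (a b c d : Char) (r : List Char) :
    countAll (a :: b :: c :: d :: r) = indHead (a :: b :: c :: d :: r) + countAll (b :: c :: d :: r) := rfl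

theorem countAll_match (c : Char) (r : List Char) :
    countAll ('c' :: 'o' :: c :: 'e' :: r) = 1 + countAll r := by
  rw [countAll, countAll, countAll, countAll]
  rw [indHead_zero_head (x := 'o') (by decide), indHead_zero_snd (y := 'e') (by decide),
    indHead_zero_head (x := 'e') (by decide)]
  have : indHead ('c' :: 'o' :: c :: 'e' :: r) = 1 := by simp [indHead]
  rw [this]; ring

theorem drop_window (cs : List Char) (k : Nat) (h : k + 4 ≤ cs.length) :
    ∃ a b c d, cs[k]? = some a ∧ cs[k+1]? = some b ∧ cs[k+2]? = some c ∧ cs[k+3]? = some d ∧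
      cs.drop k = a :: b :: c :: d :: cs.drop (k + 4) := by
  refine ⟨cs[k], cs[k+1], cs[k+2], cs[k+3], ?_, ?_, ?_, ?_, ?_⟩ <;>
    first
      | exact List.getElem?_eq_getElem (by omega)
      | (rw [List.drop_eq_getElem_cons (by omega), List.drop_eq_getElem_cons (by omega),
           List.drop_eq_getElem_cons (by omega), List.drop_eq_getElem_cons (by omega)]
         norm_num)

theorem hascodeAltGo_eq (cs : List Char) (i tot : Int) (hi : 0 ≤ i) :
    hascodeAltGo cs i tot = tot + countAll (cs.drop i.toNat) := by
  fun_induction hascodeAltGo cs i tot with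
  | case1 i tot h hmatch ih =>
      -- match at i: window decomposition, the three overlapping windows are dead
      obtain ⟨hc, ho, he⟩ := hmatch
      have h4 : i.toNat + 4 ≤ cs.length := by omega
      obtain ⟨a, b, c, d, ha, hb, hc', hd, hdrop⟩ := drop_window cs i.toNat h4
      have gc : cs[i.toNat]? = some 'c' := by
        rw [← hc, PySem.List.pyGet?_of_nonneg cs hi]
      have go : cs[i.toNat + 1]? = some 'o' := by
        rw [← ho, PySem.List.pyGet?_of_nonneg cs (by omega : (0:Int) ≤ i + 1)]
        congr 1; omega
      have ge : cs[i.toNat + 3]? = some 'e' := by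
        rw [← he, PySem.List.pyGet?_of_nonneg cs (by omega : (0:Int) ≤ i + 3)]
        congr 1; omega
      have ea : a = 'c' := by rw [ha] at gc; exact Option.some.inj gc
      have eb : b = 'o' := by rw [hb] at go; exact Option.some.inj go
      have ed : d = 'e' := by rw [hd] at ge; exact Option.some.inj ge
      have hnext : ((i + 4).toNat) = i.toNat + 4 := by omega
      rw [ih (by omega), hnext, hdrop, ea, eb, ed, countAll_match]
      ring
  | case2 i tot h hmatch ih =>
      have h4 : i.toNat + 4 ≤ cs.length := by omega
      obtain ⟨a, b, c, d, ha, hb, hc', hd, hdrop⟩ := drop_window cs i.toNat h4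
      have hnext : ((i + 1).toNat) = i.toNat + 1 := by omega
      have hdrop1 : cs.drop (i.toNat + 1) = b :: c :: d :: cs.drop (i.toNat + 4) := by
        rw [← List.drop_drop (i := 1) (j := i.toNat), hdrop]
        rfl
      have hzero : indHead (a :: b :: c :: d :: cs.drop (i.toNat + 4)) = 0 := by
        rw [indHead, if_neg]
        intro ⟨ea, eb, ed⟩
        apply hmatch
        refine ⟨?_, ?_, ?_⟩
        · rw [PySem.List.pyGet?_of_nonneg cs hi, ha, ea]
        · rw [PySem.List.pyGet?_of_nonneg cs (by omega : (0:Int) ≤ i + 1)]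
          have e : (i + 1).toNat = i.toNat + 1 := by omega
          rw [e, hb, eb]
        · rw [PySem.List.pyGet?_of_nonneg cs (by omega : (0:Int) ≤ i + 3)]
          have e : (i + 3).toNat = i.toNat + 3 := by omega
          rw [e, hd, ed]
      rw [ih (by omega), hnext, hdrop1, hdrop, countAll_four, hzero]
      ring
  | case3 i tot h =>
      have : (cs.drop i.toNat).length ≤ 3 := by
        simp [List.length_drop]; omega
      rw [countAll_short this]; ring

-- ===== VERDICT (by name: the statement is the Claim_ definition above) =====
theorem hascode_spec : Claim_equal_hascode := by
  intro string _
  unfold Spec_hascode hascode_alt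
  rw [hascode_eq_countAll, hascodeAltGo_eq string.toList 0 0 le_rfl]
  simp
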